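-- pv_equiv track=rewrite | github.com/DanielMevs/Advanced-Python-Coding-Challenges | challenge/html2markdown.py | getConsecutiveSpaces
-- ===== SOURCE A (Python) =====
-- def getConsecutiveSpaces(phrase):
--     result = {}
--     i = 1
--     while i < len(phrase):
--         runSum = 0
--         prev = phrase[i - 1]
--         temp = i
--         while i < len(phrase) and prev == ' ' and phrase[i] == ' ':
--             runSum += 1
--             i += 1
--         if runSum > 1:
--             result[temp] = runSum
--
--         i += 1
--
--     return result
-- ===== SOURCE B (Python) =====
-- def getConsecutiveSpaces(phrase):
--     # Two-phase: materialize maximal runs (char, start, length), then build the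
--     # dict from the qualifying space runs in one comprehension.
--     runs = []
--     pos = 0
--     n = len(phrase)
--     while pos < n:
--         end = pos + 1
--         while end < n and phrase[end] == phrase[pos]:
--             end += 1
--         runs.append((phrase[pos], pos, end - pos))
--         pos = end
--     return {s + 1: L - 1 for c, s, L in runs if c == ' ' and L >= 3}
-- ===== Notes on version B (the rewrite author's own statement) =====
-- stated objective: alternative
-- what changed: A's captured-prev nested-while index walk is replaced by a two-phase run-length decomposition: first materialize all maximal runs (char, start, length), then build the result from the space runs of length >= 3 in a single comprehension.
import Mathlib
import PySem

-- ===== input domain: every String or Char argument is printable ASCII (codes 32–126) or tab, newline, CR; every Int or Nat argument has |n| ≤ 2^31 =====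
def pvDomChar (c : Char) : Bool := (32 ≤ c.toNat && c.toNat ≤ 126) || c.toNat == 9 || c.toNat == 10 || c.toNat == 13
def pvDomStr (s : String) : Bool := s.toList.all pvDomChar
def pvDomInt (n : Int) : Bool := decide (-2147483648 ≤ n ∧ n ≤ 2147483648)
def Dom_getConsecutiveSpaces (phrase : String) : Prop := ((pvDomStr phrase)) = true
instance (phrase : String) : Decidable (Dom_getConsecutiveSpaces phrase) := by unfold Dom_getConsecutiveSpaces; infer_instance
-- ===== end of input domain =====

-- B replaces A's captured-prev nested-while index walk by a two-phase run-length
-- decomposition (materialize maximal runs, then filter the qualifying space runs);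
-- objective: alternative structure, same asymptotic cost.

-- ===== PORT A =====
-- inner while: 'while i < len(phrase) and prev == " " and phrase[i] == " ": runSum += 1; i += 1'
-- (all indexing is in range, so List.getD with a default is exact)
def aInner (cs : List Char) (prev : Char) (i runSum : Nat) : Nat × Nat :=
  if h : i < cs.length ∧ prev = ' ' ∧ cs.getD i ' ' = ' ' then
    aInner cs prev (i + 1) (runSum + 1)
  else (i, runSum)
termination_by cs.length - i
decreasing_by omega

theorem aInner_fst_ge (cs : List Char) (prev : Char) (i runSum : Nat) :
    i ≤ (aInner cs prev i runSum).1 := by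
  fun_induction aInner with
  | case1 i r h ih => omega
  | case2 i r h => simp

-- outer while loop of A; result is a Python dict (PySem.Dict);
-- 'prev' is cs.getD (i-1) ' ', 'temp' is i (written inline)
def aOuter (cs : List Char) (i : Nat) (result : PySem.Dict Int Int) : PySem.Dict Int Int :=
  if h : i < cs.length then
    aOuter cs ((aInner cs (cs.getD (i - 1) ' ') i 0).1 + 1)
      (if (aInner cs (cs.getD (i - 1) ' ') i 0).2 > 1 then
        result.insert (i : Int) (((aInner cs (cs.getD (i - 1) ' ') i 0).2 : Nat) : Int)
      else result)
  else result
termination_by cs.length + 1 - i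
decreasing_by
  have := aInner_fst_ge cs (cs.getD (i - 1) ' ') i 0
  omega

def getConsecutiveSpaces (phrase : String) : List (Int × Int) :=
  (aOuter phrase.toList 1 PySem.Dict.empty).items

-- ===== PORT B =====
-- inner while of Source B: 'while end < n and phrase[end] == phrase[pos]: end += 1'
def runEnd (cs : List Char) (c : Char) (e : Nat) : Nat :=
  if h : e < cs.length ∧ cs.getD e ' ' = c then runEnd cs c (e + 1) else e
termination_by cs.length - e
decreasing_by omega

theorem runEnd_ge (cs : List Char) (c : Char) (e : Nat) : e ≤ runEnd cs c e := by
  fun_induction runEnd with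
  | case1 e h ih => omega
  | case2 e _ => exact le_refl e

-- outer while of Source B, building the runs list
def buildRuns (cs : List Char) (pos : Nat) (runs : List (Char × Nat × Nat)) :
    List (Char × Nat × Nat) :=
  if h : pos < cs.length then
    buildRuns cs (runEnd cs (cs.getD pos ' ') (pos + 1))
      (runs ++ [(cs.getD pos ' ', pos, runEnd cs (cs.getD pos ' ') (pos + 1) - pos)])
  else runs
termination_by cs.length - pos
decreasing_by
  have := runEnd_ge cs (cs.getD pos ' ') (pos + 1)
  omega

-- the dict comprehension '{s + 1: L - 1 for c, s, L in runs if c == " " and L >= 3}'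
def emitRuns (d : PySem.Dict Int Int) (runs : List (Char × Nat × Nat)) : PySem.Dict Int Int :=
  runs.foldl
    (fun d r => if r.1 = ' ' ∧ r.2.2 ≥ 3 then d.insert ((r.2.1 : Int) + 1) ((r.2.2 : Int) - 1) else d)
    d

def getConsecutiveSpaces_alt (phrase : String) : List (Int × Int) :=
  (emitRuns PySem.Dict.empty (buildRuns phrase.toList 0 [])).items

-- ===== PRECONDITION & SPEC =====
def Spec_getConsecutiveSpaces (phrase : String) (out : List (Int × Int)) : Prop := out = getConsecutiveSpaces_alt phrase
instance (phrase : String) (out : List (Int × Int)) : Decidable (Spec_getConsecutiveSpaces phrase out) := by unfold Spec_getConsecutiveSpaces; infer_instance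

-- ===== CLAIM (what is proved, stated in full; the proofs are below) =====
def Claim_equal_getConsecutiveSpaces : Prop := ∀ (phrase : String), Dom_getConsecutiveSpaces phrase → Spec_getConsecutiveSpaces phrase (getConsecutiveSpaces phrase)

-- ===== LEMMAS AND PROOFS =====

theorem aInner_eq_self (cs : List Char) (prev : Char) (i r : Nat)
    (h : ¬ (i < cs.length ∧ prev = ' ' ∧ cs.getD i ' ' = ' ')) :
    aInner cs prev i r = (i, r) := by
  rw [aInner, dif_neg h]

theorem runEnd_le (cs : List Char) (c : Char) (e : Nat) :
    runEnd cs c e ≤ max e cs.length := by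
  fun_induction runEnd with
  | case1 e h ih =>
      have h1 := h.1
      omega
  | case2 e h => omega

theorem runEnd_mem (cs : List Char) (c : Char) (e : Nat) :
    ∀ j, e ≤ j → j < runEnd cs c e → cs.getD j ' ' = c := by
  fun_induction runEnd with
  | case1 e h ih =>
      intro j hj1 hj2
      rcases Nat.eq_or_lt_of_le hj1 with rfl | hlt
      · exact h.2
      · exact ih j hlt hj2
  | case2 e _ =>
      intro j hj1 hj2; omega

-- aInner with prev = ' ' is exactly runEnd for spaces
theorem aInner_space (cs : List Char) (i runSum : Nat) :
    aInner cs ' ' i runSum = (runEnd cs ' ' i, runSum + (runEnd cs ' ' i - i)) := by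
  fun_induction aInner with
  | case1 i r h ih =>
      rw [runEnd, dif_pos ⟨h.1, h.2.2⟩, ih]
      have hg := runEnd_ge cs ' ' (i + 1)
      congr 1
      omega
  | case2 i r h =>
      rw [runEnd, dif_neg (fun hc => h ⟨hc.1, rfl, hc.2⟩)]
      simp

-- one vacuous step of the outer loop
theorem aOuter_step (cs : List Char) (i : Nat) (d : PySem.Dict Int Int)
    (h : ¬ (cs.getD (i - 1) ' ' = ' ' ∧ cs.getD i ' ' = ' ')) :
    aOuter cs i d = aOuter cs (i + 1) d := by
  by_cases hi : i < cs.length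
  · rw [aOuter, dif_pos hi,
      aInner_eq_self cs (cs.getD (i - 1) ' ') i 0 (fun hc => h ⟨hc.2.1, hc.2.2⟩)]
    simp
  · rw [aOuter, dif_neg hi, aOuter, dif_neg (by omega)]

-- walking through a stretch with no space pair does nothing
theorem aOuter_walk (cs : List Char) (k : Nat) :
    ∀ i, i ≤ k →
    (∀ j, i ≤ j → j < k → ¬ (cs.getD (j - 1) ' ' = ' ' ∧ cs.getD j ' ' = ' ')) →
    ∀ d, aOuter cs i d = aOuter cs k d := by
  induction k with
  | zero =>
      intro i hi _ d
      have : i = 0 := by omega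
      subst this; rfl
  | succ k ih =>
      intro i hi hcond d
      rcases Nat.eq_or_lt_of_le hi with rfl | hlt
      · rfl
      · have h1 : aOuter cs i d = aOuter cs k d :=
          ih i (by omega) (fun j hj1 hj2 => hcond j hj1 (by omega)) d
        rw [h1]
        exact aOuter_step cs k d (hcond k (by omega) (by omega))

-- the accumulator of buildRuns is a prefix
theorem buildRuns_acc (cs : List Char) :
    ∀ n pos runs₁ runs₂, cs.length - pos ≤ n →
    buildRuns cs pos (runs₁ ++ runs₂) = runs₁ ++ buildRuns cs pos runs₂ := by
  intro n
  induction n with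
  | zero =>
      intro pos r1 r2 hn
      rw [buildRuns, dif_neg (by omega), buildRuns, dif_neg (by omega)]
  | succ n ih =>
      intro pos r1 r2 hn
      by_cases hpos : pos < cs.length
      · rw [buildRuns, dif_pos hpos]
        conv_rhs => rw [buildRuns, dif_pos hpos]
        rw [List.append_assoc]
        apply ih
        have h1 := runEnd_ge cs (cs.getD pos ' ') (pos + 1)
        omega
      · rw [buildRuns, dif_neg hpos, buildRuns, dif_neg hpos]

theorem buildRuns_acc' (cs : List Char) (pos : Nat) (runs : List (Char × Nat × Nat)) :
    buildRuns cs pos runs = runs ++ buildRuns cs pos [] := by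
  have := buildRuns_acc cs (cs.length - pos) pos runs [] (by omega)
  simpa using this

-- MAIN BRIDGE: A's loop resumed at pos + 1 equals emitting B's runs built from pos
theorem main_bridge (cs : List Char) :
    ∀ n pos d, cs.length - pos ≤ n →
    aOuter cs (pos + 1) d = emitRuns d (buildRuns cs pos []) := by
  intro n
  induction n with
  | zero =>
      intro pos d hn
      rw [aOuter, dif_neg (by omega), buildRuns, dif_neg (by omega)]
      rfl
  | succ n ih =>
      intro pos d hn
      by_cases hpos : pos < cs.length
      case neg =>
        rw [aOuter, dif_neg (by omega), buildRuns, dif_neg hpos]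
        rfl
      case pos =>
      have hrhs : buildRuns cs pos [] =
          (cs.getD pos ' ', pos, runEnd cs (cs.getD pos ' ') (pos + 1) - pos)
            :: buildRuns cs (runEnd cs (cs.getD pos ' ') (pos + 1)) [] := by
        conv_lhs => rw [buildRuns, dif_pos hpos]
        rw [buildRuns_acc']
        simp
      generalize hE : runEnd cs (cs.getD pos ' ') (pos + 1) = e at hrhs
      have hege : pos + 1 ≤ e := by
        have := runEnd_ge cs (cs.getD pos ' ') (pos + 1); omega
      have hele : e ≤ cs.length := by
        have := runEnd_le cs (cs.getD pos ' ') (pos + 1); omega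
      have hmem : ∀ j, pos ≤ j → j < e → cs.getD j ' ' = cs.getD pos ' ' := by
        intro j hj1 hj2
        rcases Nat.eq_or_lt_of_le hj1 with rfl | hlt
        · rfl
        · exact runEnd_mem cs (cs.getD pos ' ') (pos + 1) j hlt (by rw [hE]; exact hj2)
      by_cases hsp : cs.getD pos ' ' = ' '
      case neg =>
        -- nonspace run: A walks it step by step, B skips it
        have hwalk : aOuter cs (pos + 1) d = aOuter cs (e + 1) d := by
          apply aOuter_walk cs (e + 1) (pos + 1) (by omega)
          intro j hj1 hj2 hcontra
          apply hsp
          have hj : cs.getD (j - 1) ' ' = cs.getD pos ' ' := hmem (j - 1) (by omega) (by omega)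
          rw [← hj]; exact hcontra.1
        rw [hwalk, ih e d (by omega), hrhs]
        simp only [emitRuns, List.foldl_cons]
        rw [if_neg (fun hx => hsp hx.1)]
      case pos =>
        by_cases hp1 : pos + 1 < cs.length
        case neg =>
          -- a final run of length 1 at the very end of the string
          rw [aOuter, dif_neg (by omega), hrhs]
          simp only [emitRuns, List.foldl_cons]
          rw [if_neg (fun hx => by have h2 := hx.2; omega),
            buildRuns, dif_neg (by omega)]
          simp
        case pos =>
          rw [aOuter, dif_pos hp1]
          simp only [Nat.add_sub_cancel]
          rw [hsp, aInner_space cs (pos + 1) 0]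
          have hE' : runEnd cs ' ' (pos + 1) = e := by rw [← hsp]; exact hE
          rw [hE']
          simp only [Nat.zero_add]
          rw [ih e _ (by omega), hrhs]
          simp only [emitRuns, List.foldl_cons]
          congr 1
          by_cases hbig : e - (pos + 1) > 1
          · rw [if_pos hbig, if_pos ⟨hsp, by omega⟩]
            congr 1; omega
          · rw [if_neg hbig, if_neg (fun hx => by have h2 := hx.2; omega)]

-- ===== VERDICT (by name: the statement is the Claim_ definition above) =====
theorem getConsecutiveSpaces_spec : Claim_equal_getConsecutiveSpaces := by
  intro phrase _
  unfold Spec_getConsecutiveSpaces getConsecutiveSpaces getConsecutiveSpaces_alt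
  congr 1
  exact main_bridge phrase.toList phrase.toList.length 0 PySem.Dict.empty (by omega)
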